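-- pv_equiv track=rewrite | github.com/vontell/GenomeSequencing | main.py | construct_overlap_graph
-- ===== SOURCE A (Python) =====
-- from typing import List
--
-- def construct_overlap_graph(kmers: List[str]) -> dict:
--   """Creates an adjacency graph for the kmers
--   """
--   graph = {kmer: set() for kmer in kmers}
--   for kmer_source in kmers:
--     for kmer_target in kmers:
--       source_suffix = kmer_source[1:]
--       target_prefix = kmer_target[:-1]
--       if source_suffix == target_prefix:
--         graph[kmer_source].add(kmer_target)
--   return graph
-- ===== SOURCE B (Python) =====
-- from typing import List
--
-- def construct_overlap_graph(kmers: List[str]) -> dict: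
--     """Creates an adjacency graph for the kmers (prefix-indexed, one pass per side)."""
--     index = {}
--     for t in kmers:
--         index.setdefault(t[:-1], []).append(t)
--     graph = {}
--     for s in kmers:
--         graph[s] = set(index.get(s[1:], []))
--     return graph
-- ===== Notes on version B (the rewrite author's own statement) =====
-- stated objective: faster
-- what changed: Replaces A's all-pairs nested scan comparing every source suffix with every target prefix by a one-pass dict indexing targets by their prefix, then one lookup of each source's suffix.
import Mathlib
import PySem

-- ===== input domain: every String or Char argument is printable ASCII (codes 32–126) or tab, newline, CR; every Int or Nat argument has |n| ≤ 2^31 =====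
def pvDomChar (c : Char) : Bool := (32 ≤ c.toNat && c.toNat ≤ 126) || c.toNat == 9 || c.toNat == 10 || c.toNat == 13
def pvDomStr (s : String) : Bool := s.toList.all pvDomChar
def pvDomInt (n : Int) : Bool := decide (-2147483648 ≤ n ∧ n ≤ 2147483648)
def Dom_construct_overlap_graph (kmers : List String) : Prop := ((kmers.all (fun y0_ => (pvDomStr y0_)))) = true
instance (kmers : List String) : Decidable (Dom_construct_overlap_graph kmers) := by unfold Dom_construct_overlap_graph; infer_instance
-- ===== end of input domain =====

-- B replaces A's quadratic all-pairs suffix/prefix scan by a prefix-indexed dictionary built in one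
-- pass, looked up once per kmer (objective: faster, asymptotically fewer comparisons).

-- ===== PORT A =====
def construct_overlap_graph (kmers : List String) : List (String × List String) :=
  let graph : PySem.Dict String (PySem.Set String) :=
    kmers.foldl (fun g kmer => g.insert kmer PySem.Set.empty) PySem.Dict.empty
  let graph :=
    kmers.foldl (fun g kmer_source =>
      kmers.foldl (fun g kmer_target =>
        let source_suffix := PySem.Str.slice kmer_source (some 1) none
        let target_prefix := PySem.Str.slice kmer_target none (some (-1))
        if source_suffix == target_prefix then
          -- graph[kmer_source].add(kmer_target): kmer_source is always a key, so the default is never used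
          g.modify kmer_source PySem.Set.empty (fun s => PySem.Set.add s kmer_target)
        else g) g) graph
  graph.items

-- ===== PORT B =====
def construct_overlap_graph_alt (kmers : List String) : List (String × List String) :=
  let index : PySem.Dict String (List String) :=
    kmers.foldl (fun d t =>
      d.modify (PySem.Str.slice t none (some (-1))) [] (fun l => l ++ [t])) PySem.Dict.empty
  let graph : PySem.Dict String (PySem.Set String) :=
    kmers.foldl (fun g s =>
      g.insert s (PySem.Set.ofList
        (index.getD (PySem.Str.slice s (some 1) none) []))) PySem.Dict.empty
  graph.items

-- ===== PRECONDITION & SPEC =====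
def Spec_construct_overlap_graph (kmers : List String) (out : List (String × List String)) : Prop := out = construct_overlap_graph_alt kmers
instance (kmers : List String) (out : List (String × List String)) : Decidable (Spec_construct_overlap_graph kmers out) := by unfold Spec_construct_overlap_graph; infer_instance

-- ===== CLAIM (what is proved, stated in full; the proofs are below) =====
def Claim_equal_construct_overlap_graph : Prop := ∀ (kmers : List String), Dom_construct_overlap_graph kmers → Spec_construct_overlap_graph kmers (construct_overlap_graph kmers)

-- ===== LEMMAS AND PROOFS =====

-- abbreviations for the two slices
def pvSuf (s : String) : String := PySem.Str.slice s (some 1) none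
def pvPre (t : String) : String := PySem.Str.slice t none (some (-1))

-- A's inner loop over a fixed source s, abstracted over the target list l
def pvInner (kmers : List String) (g : PySem.Dict String (PySem.Set String)) (s : String) :
    PySem.Dict String (PySem.Set String) :=
  kmers.foldl (fun g t =>
    if pvSuf s == pvPre t then g.modify s PySem.Set.empty (fun st => PySem.Set.add st t) else g) g

lemma pvInner_getD_ne (kmers : List String) (g : PySem.Dict String (PySem.Set String))
    (s x : String) (hx : x ≠ s) :
    (pvInner kmers g s).getD x PySem.Set.empty = g.getD x PySem.Set.empty := by
  induction kmers generalizing g with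
  | nil => rfl
  | cons t l ih =>
      simp only [pvInner, List.foldl_cons] at *
      split
      · rw [ih]; rw [PySem.Dict.getD_modify, if_neg hx]
      · exact ih g

lemma pvInner_getD_self (kmers : List String) (g : PySem.Dict String (PySem.Set String))
    (s : String) :
    (pvInner kmers g s).getD s PySem.Set.empty =
      PySem.Set.update (g.getD s PySem.Set.empty)
        (kmers.filter (fun t => pvSuf s == pvPre t)) := by
  induction kmers generalizing g with
  | nil => rfl
  | cons t l ih =>
      simp only [pvInner, List.foldl_cons, List.filter_cons] at *
      split
      · rw [ih, PySem.Dict.getD_modify_self]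
        rfl
      · exact ih g

lemma pvInner_keys (kmers : List String) (g : PySem.Dict String (PySem.Set String))
    (s : String) (hs : g.contains s = true) :
    (pvInner kmers g s).keys = g.keys := by
  induction kmers generalizing g with
  | nil => rfl
  | cons t l ih =>
      simp only [pvInner, List.foldl_cons] at *
      split
      · rw [ih]
        · rw [PySem.Dict.keys_modify, PySem.Dict.keys_insert_of_contains _ _ hs]
        · rw [PySem.Dict.contains_modify]; simp [hs]
      · exact ih g hs

lemma pv_foldl_add_of_subset (L : List String) (s : PySem.Set String)
    (h : ∀ t ∈ L, t ∈ s) : L.foldl PySem.Set.add s = s := by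
  induction L generalizing s with
  | nil => rfl
  | cons t l ih =>
      simp only [List.foldl_cons]
      rw [PySem.Set.add_of_mem (h t (by simp))]
      exact ih s (fun u hu => h u (by simp [hu]))

lemma pv_update_idem (v : PySem.Set String) (F : List String) :
    PySem.Set.update (PySem.Set.update v F) F = PySem.Set.update v F := by
  unfold PySem.Set.update
  apply pv_foldl_add_of_subset
  intro t ht
  exact (PySem.Set.mem_update v F t).mpr (Or.inr ht)

-- the outer loop of A: final value at a key x
lemma pvOuter_getD (kmers l : List String) (g : PySem.Dict String (PySem.Set String)) (x : String) :
    (l.foldl (fun g s => pvInner kmers g s) g).getD x PySem.Set.empty =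
      if x ∈ l then
        PySem.Set.update (g.getD x PySem.Set.empty) (kmers.filter (fun t => pvSuf x == pvPre t))
      else g.getD x PySem.Set.empty := by
  induction l generalizing g with
  | nil => simp
  | cons s l ih =>
      simp only [List.foldl_cons, ih, List.mem_cons]
      by_cases hsx : x = s
      · subst hsx
        rw [pvInner_getD_self]
        by_cases hxl : x ∈ l
        · rw [if_pos hxl, if_pos (Or.inl rfl), pv_update_idem]
        · rw [if_neg hxl, if_pos (Or.inl rfl)]
      · rw [pvInner_getD_ne kmers g s x hsx]
        by_cases hxl : x ∈ l
        · rw [if_pos hxl, if_pos (Or.inr hxl)]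
        · rw [if_neg hxl, if_neg (by rintro (h | h) <;> [exact hsx h; exact hxl h])]

lemma pvOuter_keys (kmers l : List String) (g : PySem.Dict String (PySem.Set String))
    (h : ∀ s ∈ l, s ∈ g.keys) :
    (l.foldl (fun g s => pvInner kmers g s) g).keys = g.keys := by
  induction l generalizing g with
  | nil => rfl
  | cons s l ih =>
      simp only [List.foldl_cons]
      have hk : (pvInner kmers g s).keys = g.keys :=
        pvInner_keys kmers g s ((PySem.Dict.contains_iff_mem_keys g s).mpr (h s (by simp)))
      rw [ih _ (fun u hu => by rw [hk]; exact h u (by simp [hu])), hk]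

-- fold of inserts whose value depends only on the key
lemma pvInsertFold_getD (l : List String) (v : String → PySem.Set String)
    (g : PySem.Dict String (PySem.Set String)) (x : String) :
    (l.foldl (fun g s => g.insert s (v s)) g).getD x PySem.Set.empty =
      if x ∈ l then v x else g.getD x PySem.Set.empty := by
  induction l generalizing g with
  | nil => simp
  | cons s l ih =>
      simp only [List.foldl_cons, ih, List.mem_cons]
      by_cases hxl : x ∈ l
      · rw [if_pos hxl, if_pos (Or.inr hxl)]
      · by_cases hsx : x = s
        · subst hsx
          rw [if_neg hxl, if_pos (Or.inl rfl), PySem.Dict.getD_insert, if_pos rfl]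
        · rw [if_neg hxl, if_neg (by rintro (h | h) <;> [exact hsx h; exact hxl h]),
              PySem.Dict.getD_insert, if_neg hsx]

-- B's index: index[p] is the list of kmers whose prefix is p, in order
lemma pvIndex_getD (kmers : List String) (p : String) :
    ((kmers.foldl (fun d t => d.modify (pvPre t) [] (fun l => l ++ [t]))
        PySem.Dict.empty).getD p []) =
      kmers.filter (fun t => pvPre t == p) := by
  have h := PySem.Dict.getD_foldl_modify_append
    (kmers.map (fun t => (pvPre t, t))) PySem.Dict.empty p
  rw [List.foldl_map] at h
  simp only [h, PySem.Dict.getD_empty, List.nil_append, List.filter_map, List.map_map]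
  show List.map (fun t => t) _ = _
  exact List.map_id' _

-- ===== VERDICT (by name: the statement is the Claim_ definition above) =====
theorem construct_overlap_graph_spec : Claim_equal_construct_overlap_graph := by
  intro kmers _
  show (kmers.foldl (fun g s => pvInner kmers g s)
          (kmers.foldl (fun g kmer => g.insert kmer PySem.Set.empty) PySem.Dict.empty)).items =
       (kmers.foldl (fun g s => g.insert s (PySem.Set.ofList
          ((kmers.foldl (fun d t => d.modify (pvPre t) [] (fun l => l ++ [t]))
              PySem.Dict.empty).getD (pvSuf s) []))) PySem.Dict.empty).items
  set g0 : PySem.Dict String (PySem.Set String) :=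
    kmers.foldl (fun g kmer => g.insert kmer PySem.Set.empty) PySem.Dict.empty with hg0
  set idx : PySem.Dict String (List String) :=
    kmers.foldl (fun d t => d.modify (pvPre t) [] (fun l => l ++ [t])) PySem.Dict.empty with hidx
  set gB : PySem.Dict String (PySem.Set String) :=
    kmers.foldl (fun g s => g.insert s (PySem.Set.ofList (idx.getD (pvSuf s) [])))
      PySem.Dict.empty with hgB
  have hg0keys : g0.keys = PySem.Set.ofList kmers := by
    rw [hg0, PySem.Dict.keys_foldl_insert]; rfl
  have hg0nodup : g0.keys.Nodup := by rw [hg0keys]; exact PySem.Set.nodup_ofList kmers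
  have hAkeys : (kmers.foldl (fun g s => pvInner kmers g s) g0).keys = g0.keys :=
    pvOuter_keys kmers kmers g0 (fun s hs => by
      rw [hg0keys]; exact (PySem.Set.mem_ofList kmers s).mpr hs)
  have hBkeys : gB.keys = PySem.Set.ofList kmers := by
    rw [hgB, PySem.Dict.keys_foldl_insert]; rfl
  have hBnodup : gB.keys.Nodup := by rw [hBkeys]; exact PySem.Set.nodup_ofList kmers
  rw [PySem.Dict.items_eq_map_keys _ (hAkeys ▸ hg0nodup) PySem.Set.empty,
      PySem.Dict.items_eq_map_keys gB hBnodup PySem.Set.empty, hAkeys, hg0keys, hBkeys]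
  apply List.map_congr_left
  intro x hx
  have hxk : x ∈ kmers := (PySem.Set.mem_ofList kmers x).mp hx
  rw [pvOuter_getD kmers kmers g0 x, if_pos hxk]
  have hg0x : g0.getD x PySem.Set.empty = PySem.Set.empty := by
    rw [hg0, pvInsertFold_getD kmers (fun _ => PySem.Set.empty) PySem.Dict.empty x, if_pos hxk]
  have hBx : gB.getD x PySem.Set.empty = PySem.Set.ofList (idx.getD (pvSuf x) []) := by
    rw [hgB, pvInsertFold_getD kmers (fun s => PySem.Set.ofList (idx.getD (pvSuf s) []))
      PySem.Dict.empty x, if_pos hxk]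
  rw [hg0x, hBx, hidx, pvIndex_getD kmers (pvSuf x)]
  have hfilter : (kmers.filter (fun t => pvPre t == pvSuf x)) =
      (kmers.filter (fun t => pvSuf x == pvPre t)) := by
    apply List.filter_congr
    intro t _
    simp [Bool.beq_comm]
  rw [hfilter, PySem.Set.ofList_eq_foldl]
  rfl
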